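-- pv_equiv track=rewrite | github.com/guige2023/rabai_autoclick | actions/data_sorting_action.py | _multi_key_sort_tuples
-- ===== SOURCE A (Python) =====
-- from typing import Any, Dict, List, Optional, Callable
--
-- def _multi_key_sort_tuples(data: List, keys: List[int], orders: List[str]) -> List:
--     def sort_key(item):
--         values = []
--         for i, k in enumerate(keys):
--             order = orders[i] if i < len(orders) else "asc"
--             val = item[k] if k < len(item) else None
--             if order == "desc":
--                 val = -val if isinstance(val, (int, float)) else val
--             values.append(val)
--         return tuple(values)
--
--     return sorted(data, key=sort_key)
-- ===== SOURCE B (Python) =====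
-- def _multi_key_sort_tuples(data, keys, orders):
--     result = list(data)
--     for i in range(len(keys) - 1, -1, -1):
--         k = keys[i]
--         desc = (orders[i] if i < len(orders) else "asc") == "desc"
--
--         # per-key extractor: wrap the value in a 1-tuple, an empty tuple when the
--         # row has no component k, so rows lacking the key sort first instead of raising
--         def extract(item, k=k, desc=desc):
--             val = (item[k],) if k < len(item) else ()
--             if desc:
--                 val = tuple(-v for v in val)
--             return val
--
--         result = sorted(result, key=extract)
--     return result
-- ===== Notes on version B (the rewrite author's own statement) =====
-- stated objective: alternative
-- what changed: A builds a per-element tuple of all key values and sorts once by it; B instead runs one stable single-key sorted() pass per key, iterating the keys from last to first and letting stability compose the orderings (LSD-radix style), with per-key values wrapped in a 0/1-tuple so missing components never raise.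
-- outside the precondition, e.g. on _multi_key_sort_tuples([[1, 5], [2]], [0, 1], []): A returns [[1, 5], [2]], B returns [[1, 5], [2]]
import Mathlib
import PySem

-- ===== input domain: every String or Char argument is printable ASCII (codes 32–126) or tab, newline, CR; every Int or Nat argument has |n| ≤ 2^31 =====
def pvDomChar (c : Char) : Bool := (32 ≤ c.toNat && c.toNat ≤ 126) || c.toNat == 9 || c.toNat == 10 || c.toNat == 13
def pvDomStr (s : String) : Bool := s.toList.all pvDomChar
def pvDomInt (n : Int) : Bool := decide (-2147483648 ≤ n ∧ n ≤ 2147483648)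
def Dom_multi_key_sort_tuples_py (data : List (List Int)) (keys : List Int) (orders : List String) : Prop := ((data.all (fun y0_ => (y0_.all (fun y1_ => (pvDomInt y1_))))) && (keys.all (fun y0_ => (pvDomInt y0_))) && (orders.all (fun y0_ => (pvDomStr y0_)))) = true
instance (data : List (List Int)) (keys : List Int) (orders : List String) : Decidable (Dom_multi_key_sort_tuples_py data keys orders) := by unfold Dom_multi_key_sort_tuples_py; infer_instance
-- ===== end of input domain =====

-- B replaces A's one sort on built-up key tuples by LSD-style multiple stable single-key
-- passes (last key first); same cost class, a genuinely different decomposition ('alternative').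

-- ===== PORT A =====
-- Shared per-element key extractor. In A the per-key value is
-- `item[k] if k < len(item) else None`; in B it is the same value wrapped in a 1-tuple,
-- `()` when missing. Both are modelled in `List Int`: `None/() ↦ []`, an int `z ↦ [z]`
-- (for B this is literally its tuple; for A int-int comparisons are exact and None-None
-- are ties — inside Pre_ below a None never meets an int in a comparison: Python would
-- raise TypeError there, as it raises IndexError on k < -len(item), both excluded).
-- "desc" negates elementwise: `-val` on a number, None/() unchanged.
def pvVal (k : Int) (ord : String) (item : List Int) : List Int :=
  let v : List Int :=
    if k < (item.length : Int) then
      match PySem.List.pyGet? item k with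
      | some z => [z]
      | none => []
    else []
  if ord = "desc" then v.map (fun z => -z) else v

-- sorted(data, key=sort_key) where sort_key builds the list of per-key values in a loop
def multi_key_sort_tuples_py (data : List (List Int)) (keys : List Int) (orders : List String) : List (List Int) :=
  PySem.List.sorted data
    (fun item =>
      (PySem.List.enumerate keys).foldl
        (fun values p => values ++ [pvVal p.2 (PySem.List.pyGetD orders p.1 "asc") item]) [])
    false

-- ===== PORT B =====
-- for i in range(len(keys)-1, -1, -1): result = sorted(result, key=<single-key extractor>)
-- (keys[i] is always in range, ported as pyGetD with an irrelevant default 0)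
def multi_key_sort_tuples_py_alt (data : List (List Int)) (keys : List Int) (orders : List String) : List (List Int) :=
  (PySem.List.pyRange ((keys.length : Int) - 1) (-1) (-1)).foldl
    (fun result i =>
      PySem.List.sorted result
        (fun item => pvVal (PySem.List.pyGetD keys i 0) (PySem.List.pyGetD orders i "asc") item)
        false)
    data

-- ===== PRECONDITION & SPEC =====
-- Pre_ excludes (1) inputs where some key k falls below -len(row) for some row: A raises
-- IndexError inside the key function; and (2) for data with >= 2 rows, keys in range for
-- some rows but not others (mixed columns): there A usually raises TypeError on a
-- None-vs-int comparison and only returns when an earlier key happens to shadow that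
-- comparison -- an accident of the sort's comparison order, not a closed-form condition
-- (B, whose per-key passes never raise, agrees with A in every such observed return).
-- Columns that are missing in ALL rows are inside Pre_: both sides treat them as ties.
def Pre_multi_key_sort_tuples_py (data : List (List Int)) (keys : List Int) (orders : List String) : Prop :=
  (∀ item ∈ data, ∀ k ∈ keys, -(item.length : Int) ≤ k) ∧
  (2 ≤ data.length → ∀ k ∈ keys,
    (∀ item ∈ data, k < (item.length : Int)) ∨ (∀ item ∈ data, (item.length : Int) ≤ k))

instance (data : List (List Int)) (keys : List Int) (orders : List String) : Decidable (Pre_multi_key_sort_tuples_py data keys orders) := by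
  unfold Pre_multi_key_sort_tuples_py; infer_instance

def pvWitness_multi_key_sort_tuples_py : List (List Int) × List Int × List String :=
  ([[1, 2], [3, 4], [1, 0]], [0, 1], ["desc"])

def Spec_multi_key_sort_tuples_py (data : List (List Int)) (keys : List Int) (orders : List String) (out : List (List Int)) : Prop := out = multi_key_sort_tuples_py_alt data keys orders
instance (data : List (List Int)) (keys : List Int) (orders : List String) (out : List (List Int)) : Decidable (Spec_multi_key_sort_tuples_py data keys orders out) := by unfold Spec_multi_key_sort_tuples_py; infer_instance

-- ===== CLAIM (what is proved, stated in full; the proofs are below) =====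
def Claim_equal_multi_key_sort_tuples_py : Prop := ∀ (data : List (List Int)) (keys : List Int) (orders : List String), Dom_multi_key_sort_tuples_py data keys orders → Pre_multi_key_sort_tuples_py data keys orders → Spec_multi_key_sort_tuples_py data keys orders (multi_key_sort_tuples_py data keys orders)

-- ===== LEMMAS AND PROOFS =====

theorem pv_insertBy_cons {α : Type} (b : α → α → Bool) (x y : α) (t : List α) :
    PySem.List.insertBy b x (y :: t) =
      if b x y then x :: y :: t else y :: PySem.List.insertBy b x t := by
  simp [PySem.List.insertBy]

-- insertBy only looks at `before x y` for members y of the list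
theorem pv_insertBy_congr {α : Type} (b1 b2 : α → α → Bool) (x : α) (S : List α)
    (h : ∀ y ∈ S, b1 x y = b2 x y) :
    PySem.List.insertBy b1 x S = PySem.List.insertBy b2 x S := by
  induction S with
  | nil => rfl
  | cons y t ih =>
    rw [pv_insertBy_cons, pv_insertBy_cons, h y (by simp),
      ih (fun z hz => h z (by simp [hz]))]

-- insertion into an append
theorem pv_insertBy_append {α : Type} (b : α → α → Bool) (x : α) (l1 l2 : List α) :
    PySem.List.insertBy b x (l1 ++ l2) =
      if l1.any (b x) then PySem.List.insertBy b x l1 ++ l2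
      else l1 ++ PySem.List.insertBy b x l2 := by
  induction l1 with
  | nil => simp
  | cons y t ih =>
    simp only [List.cons_append, pv_insertBy_cons, List.any_cons]
    by_cases hb : b x y = true
    · simp [hb]
    · simp only [Bool.not_eq_true] at hb
      simp [hb, ih]
      split_ifs <;> simp

-- one foldl step of the insertion sort, peeled at the right end
theorem pv_sorted_snoc {α κ : Type} [LT κ] [DecidableLT κ] (l : List α) (x : α) (key : α → κ) :
    PySem.List.sorted (l ++ [x]) key false =
      PySem.List.insertBy (fun a b => decide (key a < key b)) x (PySem.List.sorted l key false) := by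
  rw [PySem.List.sorted_eq_foldl_insertBy, PySem.List.sorted_eq_foldl_insertBy, List.foldl_append]
  rfl

-- the two insertions (z by the primary key alone, x by the lexicographic key) commute
-- whenever a primary tie between x and z would be broken by the secondary key in x's favour
theorem pv_comm_ins (hv : List Int → List Int) (gv : List Int → List (List Int))
    (x z : List Int) (hxz : hv x = hv z → gv x < gv z) (S : List (List Int)) :
    PySem.List.insertBy (fun a b => decide (hv a < hv b)) z
      (PySem.List.insertBy (fun a b => decide (hv a < hv b ∨ (hv a = hv b ∧ gv a < gv b))) x S) =
    PySem.List.insertBy (fun a b => decide (hv a < hv b ∨ (hv a = hv b ∧ gv a < gv b))) x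
      (PySem.List.insertBy (fun a b => decide (hv a < hv b)) z S) := by
  have hone : (hv x < hv z ∨ (hv x = hv z ∧ gv x < gv z)) ↔ ¬ (hv z < hv x) := by
    constructor
    · rintro (h | ⟨h, _⟩)
      · exact lt_asymm h
      · exact fun hc => absurd (h ▸ hc) (lt_irrefl _)
    · intro hc
      rcases lt_trichotomy (hv x) (hv z) with h | h | h
      · exact Or.inl h
      · exact Or.inr ⟨h, hxz h⟩
      · exact absurd h hc
  induction S with
  | nil =>
    by_cases hd : hv x < hv z ∨ (hv x = hv z ∧ gv x < gv z)
    · have h2 : ¬ (hv z < hv x) := hone.mp hd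
      simp [PySem.List.insertBy, hd, h2]
    · have h2 : hv z < hv x := not_not.mp (fun hc => hd (hone.mpr hc))
      simp [PySem.List.insertBy, hd, h2]
  | cons y t ih =>
    by_cases c1 : hv x < hv y ∨ (hv x = hv y ∧ gv x < gv y)
    · by_cases c2 : hv z < hv y
      · -- both insert before y
        by_cases hd : hv x < hv z ∨ (hv x = hv z ∧ gv x < gv z)
        · have h2 : ¬ (hv z < hv x) := hone.mp hd
          simp [pv_insertBy_cons, c1, c2, hd, h2]
        · have h2 : hv z < hv x := not_not.mp (fun hc => hd (hone.mpr hc))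
          simp [pv_insertBy_cons, c1, c2, hd, h2]
      · -- x before y, z after y; a tie-free consequence: z is not before x either
        have hzx : ¬ (hv z < hv x) := by
          rcases c1 with h | ⟨h, _⟩
          · exact fun hzx => c2 (lt_trans hzx h)
          · exact fun hzx => c2 (h ▸ hzx)
        simp [pv_insertBy_cons, c1, c2, hzx]
    · by_cases c2 : hv z < hv y
      · -- z before y, x after y; then x is not before z either
        have hxz2 : ¬ (hv x < hv z ∨ (hv x = hv z ∧ gv x < gv z)) := by
          rintro (h | ⟨h, _⟩)
          · exact c1 (Or.inl (lt_trans h c2))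
          · exact c1 (Or.inl (h ▸ c2))
        simp [pv_insertBy_cons, c1, c2, hxz2]
      · simp only [pv_insertBy_cons, decide_eq_false c1, decide_eq_false c2,
          Bool.false_eq_true, if_false]
        rw [ih]

-- the DecidableLT instance is irrelevant (bridge between the default instance the ports
-- elaborate with and the LinearOrder-derived one inside PySem's order lemmas)
theorem pv_dec_eq : (fun (a b : List (List Int)) => a.decidableLT b) =
    (List.instLinearOrder.toDecidableLT (α := List (List Int))) := by
  funext a b; exact Subsingleton.elim _ _

theorem pv_sorted_bridge (l : List (List Int)) (gv : List Int → List (List Int)) :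
    PySem.List.sorted l gv false =
      @PySem.List.sorted _ _ _ (List.instLinearOrder.toDecidableLT) l gv false := by
  rw [← pv_dec_eq]

-- PySem.List.sorted_pairwise, transported to the default instance
theorem pv_sorted_pairwise' (l : List (List Int)) (gv : List Int → List (List Int)) :
    (PySem.List.sorted l gv false).Pairwise (fun a b => gv a ≤ gv b) := by
  rw [pv_sorted_bridge]
  exact PySem.List.sorted_pairwise l gv

-- stable sort by the primary key of a list with one element inserted by the secondary key:
-- the insertion moves out of the sort, with the lexicographic comparison
theorem pv_K (hv : List Int → List Int) (gv : List Int → List (List Int)) (x : List Int)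
    (G : List (List Int)) (hp : G.Pairwise (fun a b => gv a ≤ gv b)) :
    PySem.List.sorted (PySem.List.insertBy (fun a b => decide (gv a < gv b)) x G) hv false =
      PySem.List.insertBy (fun a b => decide (hv a < hv b ∨ (hv a = hv b ∧ gv a < gv b))) x
        (PySem.List.sorted G hv false) := by
  induction G using List.reverseRecOn with
  | nil =>
    simp [PySem.List.insertBy, PySem.List.sorted]
  | append_singleton G' z ih =>
    rw [List.pairwise_append] at hp
    obtain ⟨hpG, -, hGz⟩ := hp
    by_cases hgxz : gv x < gv z
    · have step : PySem.List.insertBy (fun a b => decide (gv a < gv b)) x (G' ++ [z]) =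
          PySem.List.insertBy (fun a b => decide (gv a < gv b)) x G' ++ [z] := by
        rw [pv_insertBy_append]
        split_ifs with hany
        · rfl
        · rw [PySem.List.insertBy_of_forall_not_before _ _ G'
            (by
              intro y hy
              simp only [decide_eq_false_iff_not]
              intro h
              exact hany (List.any_of_mem hy (by simpa using h)))]
          simp [PySem.List.insertBy, hgxz]
      rw [step, pv_sorted_snoc, ih hpG, pv_comm_ins hv gv x z (fun _ => hgxz), pv_sorted_snoc]
    · have hnot : ∀ y ∈ G' ++ [z], (decide (gv x < gv y)) = false := by
        intro y hy
        simp only [decide_eq_false_iff_not]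
        rcases List.mem_append.mp hy with hy | hy
        · exact fun hc => hgxz (lt_of_lt_of_le hc (hGz y hy z (by simp)))
        · simp only [List.mem_singleton] at hy
          subst hy
          exact hgxz
      rw [PySem.List.insertBy_of_forall_not_before _ _ _ hnot,
        pv_sorted_snoc, pv_sorted_snoc]
      apply pv_insertBy_congr
      intro y hy
      rw [PySem.List.mem_insertBy] at hy
      have hyle : gv y ≤ gv x := by
        have hzx : gv z ≤ gv x := le_of_not_gt hgxz
        rcases hy with rfl | hy
        · exact hzx
        · rw [PySem.List.mem_sorted] at hy
          exact le_trans (hGz y hy z (by simp)) hzx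
      have hnlt : ¬ (gv x < gv y) := not_lt_of_ge hyle
      simp only [decide_eq_decide]
      tauto

-- the core radix step: one stable sort by the cons key equals a stable sort by the tail
-- key followed by a stable sort by the head key
theorem pv_CL (hv : List Int → List Int) (gv : List Int → List (List Int))
    (xs : List (List Int)) :
    PySem.List.sorted xs (fun a => hv a :: gv a) false =
      PySem.List.sorted (PySem.List.sorted xs gv false) hv false := by
  induction xs using List.reverseRecOn with
  | nil => simp [PySem.List.sorted]
  | append_singleton l x ih =>
    rw [pv_sorted_snoc, ih, pv_sorted_snoc, pv_K hv gv x _ (pv_sorted_pairwise' l gv)]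
    apply pv_insertBy_congr
    intro y _
    simp only [decide_eq_decide]
    exact List.cons_lt_cons_iff

-- a constant key sorts to the original list (all ties, stable)
theorem pv_sorted_const (xs : List (List Int)) (c : List (List Int)) :
    PySem.List.sorted xs (fun _ => c) false = xs := by
  rw [pv_sorted_bridge]
  apply PySem.List.sorted_eq_self_of_pairwise
  induction xs with
  | nil => exact List.Pairwise.nil
  | cons x t ih => exact List.Pairwise.cons (fun b _ => le_rfl) ih

-- the multi-pass fold equals the single sort on the mapped key list
theorem pv_main (orders : List String) (ps : List (Int × Int)) (data : List (List Int)) :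
    PySem.List.sorted data
      (fun item => ps.map (fun p => pvVal p.2 (PySem.List.pyGetD orders p.1 "asc") item)) false =
    ps.foldr
      (fun p acc =>
        PySem.List.sorted acc (fun item => pvVal p.2 (PySem.List.pyGetD orders p.1 "asc") item) false)
      data := by
  induction ps generalizing data with
  | nil => simpa using pv_sorted_const data ([] : List (List Int))
  | cons p ps ih =>
    simp only [List.map_cons, List.foldr_cons]
    rw [pv_CL (fun item => pvVal p.2 (PySem.List.pyGetD orders p.1 "asc") item)
        (fun item => ps.map (fun q => pvVal q.2 (PySem.List.pyGetD orders q.1 "asc") item)) data,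
      ih]

-- ===== VERDICT (by name: the statement is the Claim_ definition above) =====
theorem multi_key_sort_tuples_py_spec : Claim_equal_multi_key_sort_tuples_py := by
  intro data keys orders _ _
  unfold Spec_multi_key_sort_tuples_py multi_key_sort_tuples_py multi_key_sort_tuples_py_alt
  -- A's key loop is a map over enumerate(keys)
  have hA : (fun item : List Int =>
      (PySem.List.enumerate keys).foldl
        (fun values p => values ++ [pvVal p.2 (PySem.List.pyGetD orders p.1 "asc") item]) []) =
      (fun item : List Int =>
        (PySem.List.enumerate keys).map (fun p => pvVal p.2 (PySem.List.pyGetD orders p.1 "asc") item)) := by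
    funext item
    simpa using PySem.List.foldl_append_singleton_eq_map
      (fun p => pvVal p.2 (PySem.List.pyGetD orders p.1 "asc") item) (PySem.List.enumerate keys) []
  rw [hA]
  -- B's countdown fold is a foldr over enumerate(keys)
  have hrange : PySem.List.pyRange ((keys.length : Int) - 1) (-1) (-1) =
      (PySem.List.pyRange 0 (keys.length : Int) 1).reverse := by
    rw [PySem.List.pyRange_neg_one_eq_reverse]
    norm_num
  rw [hrange, List.foldl_reverse]
  have henum := PySem.List.enumerate_eq_map_pyRange keys 0
  rw [pv_main orders (PySem.List.enumerate keys) data, henum, List.foldr_map]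
  simp [PySem.List.len]
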